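-- pv_equiv track=rewrite | github.com/aarneranta/gf-math | data/index_latex_terms.py | index_in_text
-- ===== SOURCE A (Python) =====
-- def index_term(i, tok):
--     return tok + ' \\INDEXEDTERM{ ' + str(i) + ' } ' + tok
--
-- def is_varlist(s):
--     s = s[1:-1]  # dropping $s
--     return all(c.isspace() or c.isalpha() or c==',' for c in s)
--
-- def index_in_text(s, index=None, also_variables=False):
--     if not index:
--         index = {}
--     current_number = len(index) + 1
--     ss = s.split()
--     in_math = False
--     newss = []
--     segment = []
--     i = 0
--     while ss:
--         tok = ss.pop(0)
--         if tok in ['$', '$$']: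
--             segment.append(tok)
--             if in_math:
--                 indexed = ' '.join(segment[1:-1])  # $ not in index value
--                 newtok = ' '.join(segment)  # $ shown in doc
--                 if is_varlist(newtok) and not also_variables:
--                     newss.append(newtok)
--                 else:
--                     iterm = index_term(current_number, tok)
--                     newss.append(iterm)
--                     index[current_number] = indexed
--                     current_number += 1
--                 segment = []
--             in_math = not in_math
--         elif in_math:
--             segment.append(tok)
--         else:
--             newss.append(tok)
--     return index, ' '.join(newss)
-- ===== SOURCE B (Python) =====
-- def index_term(i, tok):
--     return tok + ' \\INDEXEDTERM{ ' + str(i) + ' } ' + tok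
--
-- def is_varlist(s):
--     s = s[1:-1]  # dropping $s
--     return all(c.isspace() or c.isalpha() or c==',' for c in s)
--
-- def _find_close(toks):
--     """Return (body, closer, rest) for the first delimiter in toks, or None."""
--     if not toks:
--         return None
--     if toks[0] in ('$', '$$'):
--         return [], toks[0], toks[1:]
--     fc = _find_close(toks[1:])
--     if fc is None:
--         return None
--     body, closer, rest = fc
--     return [toks[0]] + body, closer, rest
--
-- def index_in_text(s, index=None, also_variables=False):
--     # lookahead scan: on an opener, grab the whole math segment at once
--     if not index:
--         index = {}
--     current_number = len(index) + 1
--     rest = s.split()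
--     out = []
--     while rest:
--         tok, rest = rest[0], rest[1:]
--         if tok not in ('$', '$$'):
--             out.append(tok)
--             continue
--         fc = _find_close(rest)
--         if fc is None:
--             break  # unclosed trailing math: dropped
--         body, closer, rest = fc
--         newtok = ' '.join([tok] + body + [closer])
--         if is_varlist(newtok) and not also_variables:
--             out.append(newtok)
--         else:
--             out.append(index_term(current_number, closer))
--             index[current_number] = ' '.join(body)
--             current_number += 1
--     return index, ' '.join(out)
-- ===== Notes on version B (the rewrite author's own statement) =====
-- stated objective: alternative
-- what changed: Replaces A's token-by-token state machine (in_math flag + growing segment accumulator) with a cursor/lookahead scan: on a math-delimiter opener a helper collects the whole math segment (body, closer, rest) at once, and unclosed trailing math falls out of the no-closer case instead of leftover loop state.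
import Mathlib
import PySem

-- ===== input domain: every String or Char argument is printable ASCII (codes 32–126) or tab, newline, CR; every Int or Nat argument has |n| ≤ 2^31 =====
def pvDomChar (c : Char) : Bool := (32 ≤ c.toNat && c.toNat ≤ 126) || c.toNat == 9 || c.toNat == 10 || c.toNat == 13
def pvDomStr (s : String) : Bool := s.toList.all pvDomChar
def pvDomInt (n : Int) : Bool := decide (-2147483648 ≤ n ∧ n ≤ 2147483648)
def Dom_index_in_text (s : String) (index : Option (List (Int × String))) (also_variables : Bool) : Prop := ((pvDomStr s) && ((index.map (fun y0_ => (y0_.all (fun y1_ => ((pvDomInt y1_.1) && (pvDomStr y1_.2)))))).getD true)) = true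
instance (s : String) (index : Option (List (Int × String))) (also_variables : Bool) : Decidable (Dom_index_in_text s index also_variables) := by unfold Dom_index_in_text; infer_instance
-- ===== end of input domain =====

-- B replaces A's in_math flag + segment accumulator with a lookahead helper that grabs a whole math
-- segment (body, closer, rest) at once (objective: alternative decomposition, same cost).
-- Python A mutates the passed-in index dict; the equivalence proved here is about the return value only.

-- ===== PORT A =====
-- shared module helpers (both Python versions contain the same two helpers)
def index_term (i : Int) (tok : String) : String :=
  String.ofList (tok.toList ++ " \\INDEXEDTERM{ ".toList ++ (PySem.Int.toChars i) ++ " } ".toList ++ tok.toList)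

def is_varlist (s : String) : Bool :=
  let t := PySem.List.slice s.toList (some 1) (some (-1))  -- s[1:-1]
  t.all (fun c => PySem.Chars.isspace c || PySem.Chars.isalpha c || c == ',')

-- the while-loop of A: state (in_math, newss, segment, index, current_number)
def loopA (av : Bool) (ss : List String) (in_math : Bool) (newss segment : List String)
    (index : PySem.Dict Int String) (cur : Int) : PySem.Dict Int String × String :=
  match ss with
  | [] => (index, PySem.Str.join " " newss)
  | tok :: rest =>
    if tok = "$" ∨ tok = "$$" then
      let segment := segment ++ [tok]
      if in_math then
        let indexed := PySem.Str.join " " (PySem.List.slice segment (some 1) (some (-1)))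
        let newtok := PySem.Str.join " " segment
        if is_varlist newtok && !av then
          loopA av rest false (newss ++ [newtok]) [] index cur
        else
          loopA av rest false (newss ++ [index_term cur tok]) [] (index.insert cur indexed) (cur + 1)
      else
        loopA av rest true newss segment index cur
    else if in_math then
      loopA av rest in_math newss (segment ++ [tok]) index cur
    else
      loopA av rest in_math (newss ++ [tok]) segment index cur

def index_in_text (s : String) (index : Option (List (Int × String))) (also_variables : Bool) : (List (Int × String)) × String :=
  let d := PySem.Dict.ofList (index.getD [])      -- `if not index: index = {}`
  let cur : Int := (PySem.Dict.size d : Int) + 1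
  let r := loopA also_variables (PySem.Str.split₀ s) false [] [] d cur
  (r.1.items, r.2)

-- ===== PORT B =====
-- _find_close: first delimiter in toks as (body, closer, rest), or none
def findClose : List String → Option (List String × String × List String)
  | [] => none
  | t :: rest =>
    if t = "$" ∨ t = "$$" then some ([], t, rest)
    else
      match findClose rest with
      | none => none
      | some (body, closer, r) => some (t :: body, closer, r)

theorem findClose_length {toks body closer r} (h : findClose toks = some (body, closer, r)) :
    r.length < toks.length := by
  induction toks generalizing body with
  | nil => simp [findClose] at h
  | cons t rest ih =>
    simp only [findClose] at h
    split at h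
    · cases h; simp
    · cases hf : findClose rest with
      | none => rw [hf] at h; cases h
      | some p =>
        obtain ⟨b, c, r'⟩ := p
        rw [hf] at h; cases h
        exact Nat.lt_trans (ih hf) (by simp)

def loopB (av : Bool) (toks out : List String) (index : PySem.Dict Int String) (cur : Int) :
    PySem.Dict Int String × String :=
  match toks with
  | [] => (index, PySem.Str.join " " out)
  | tok :: rest =>
    if tok = "$" ∨ tok = "$$" then
      match hf : findClose rest with
      | none => (index, PySem.Str.join " " out)    -- unclosed trailing math: dropped
      | some (body, closer, rest') =>
        let newtok := PySem.Str.join " " ([tok] ++ body ++ [closer])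
        if is_varlist newtok && !av then
          loopB av rest' (out ++ [newtok]) index cur
        else
          loopB av rest' (out ++ [index_term cur closer]) (index.insert cur (PySem.Str.join " " body)) (cur + 1)
    else
      loopB av rest (out ++ [tok]) index cur
termination_by toks.length
decreasing_by
  · exact Nat.lt_succ_of_lt (findClose_length hf)
  · exact Nat.lt_succ_of_lt (findClose_length hf)
  · simp

def index_in_text_alt (s : String) (index : Option (List (Int × String))) (also_variables : Bool) : (List (Int × String)) × String :=
  let d := PySem.Dict.ofList (index.getD [])
  let cur : Int := (PySem.Dict.size d : Int) + 1
  let r := loopB also_variables (PySem.Str.split₀ s) [] d cur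
  (r.1.items, r.2)

-- ===== PRECONDITION & SPEC =====
def Spec_index_in_text (s : String) (index : Option (List (Int × String))) (also_variables : Bool) (out : (List (Int × String)) × String) : Prop := out = index_in_text_alt s index also_variables
instance (s : String) (index : Option (List (Int × String))) (also_variables : Bool) (out : (List (Int × String)) × String) : Decidable (Spec_index_in_text s index also_variables out) := by unfold Spec_index_in_text; infer_instance

-- ===== CLAIM (what is proved, stated in full; the proofs are below) =====
def Claim_equal_index_in_text : Prop := ∀ (s : String) (index : Option (List (Int × String))) (also_variables : Bool), Dom_index_in_text s index also_variables → Spec_index_in_text s index also_variables (index_in_text s index also_variables)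

-- ===== LEMMAS AND PROOFS =====

-- s[1:-1] of a list of the shape x :: l ++ [y] is l
theorem slice_one_negone {α : Type} (x y : α) (l : List α) :
    PySem.List.slice (x :: l ++ [y]) (some 1) (some (-1)) = l := by
  simp [PySem.List.slice]

-- A's in-math run equals one lookahead step of B
theorem loopA_math (av : Bool) (ss : List String) (newss seg : List String)
    (d : PySem.Dict Int String) (cur : Int) :
    loopA av ss true newss seg d cur =
      match findClose ss with
      | none => (d, PySem.Str.join " " newss)
      | some (body, closer, rest') =>
        let segment := seg ++ body ++ [closer]
        if is_varlist (PySem.Str.join " " segment) && !av then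
          loopA av rest' false (newss ++ [PySem.Str.join " " segment]) [] d cur
        else
          loopA av rest' false (newss ++ [index_term cur closer]) []
            (d.insert cur (PySem.Str.join " " (PySem.List.slice segment (some 1) (some (-1))))) (cur + 1) := by
  induction ss generalizing seg with
  | nil => simp [loopA, findClose]
  | cons tok rest ih =>
    by_cases hd : tok = "$" ∨ tok = "$$"
    · simp only [loopA, findClose, if_pos hd]
      simp
    · simp only [loopA, findClose, if_neg hd]
      rw [ih (seg ++ [tok])]
      cases hf : findClose rest with
      | none => simp
      | some p =>
        obtain ⟨body, closer, rest'⟩ := p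
        simp [List.append_assoc]

-- main loop equivalence
theorem loopA_eq_loopB (av : Bool) (ss : List String) (out : List String)
    (d : PySem.Dict Int String) (cur : Int) :
    loopA av ss false out [] d cur = loopB av ss out d cur := by
  fun_induction loopB av ss out d cur with
  | case1 => simp [loopA]
  | case2 out d cur tok rest hd hf =>
    simp only [loopA, if_pos hd, List.nil_append]
    rw [loopA_math, hf]
    simp
  | case3 out d cur tok rest hd body closer rest' hf newtok hv ih =>
    simp only [loopA, if_pos hd, List.nil_append]
    rw [loopA_math, hf]
    simp only [Bool.false_eq_true, if_false]
    simp only [newtok, List.singleton_append] at hv ih ⊢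
    rw [if_pos hv]
    exact ih
  | case4 out d cur tok rest hd body closer rest' hf newtok hv ih =>
    simp only [loopA, if_pos hd, List.nil_append]
    rw [loopA_math, hf]
    simp only [Bool.false_eq_true, if_false]
    simp only [newtok, List.singleton_append] at hv ih ⊢
    rw [if_neg hv, slice_one_negone]
    exact ih
  | case5 out d cur tok rest hd ih =>
    simp only [loopA, if_neg hd]
    exact ih

-- ===== VERDICT (by name: the statement is the Claim_ definition above) =====
theorem index_in_text_spec : Claim_equal_index_in_text := by
  intro s index av _
  simp only [Spec_index_in_text, index_in_text, index_in_text_alt, loopA_eq_loopB]
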